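-- pv_equiv track=rewrite | github.com/zhiyuanbuqiID/edx-platform | scripts/xss_utils/utils.py | _process_line_breaks
-- ===== SOURCE A (Python) =====
-- def _process_line_breaks(string):
--     """
--     Creates a list, where each entry represents the index into the string
--     where the next line break was found.
--
--     Arguments:
--         string: The string in which to find line breaks.
--
--     Returns:
--          A list of indices into the string at which each line begins.
--
--     """
--     line_start_indexes = [0]
--     index = 0
--     while True:
--         index = string.find('\n', index)
--         if index < 0:
--             break
--         index += 1
--         line_start_indexes.append(index)
--     return line_start_indexes
-- ===== SOURCE B (Python) =====
-- def _process_line_breaks(string):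
--     """
--     Creates a list, where each entry represents the index into the string
--     where the next line break was found.
--
--     Arguments:
--         string: The string in which to find line breaks.
--
--     Returns:
--          A list of indices into the string at which each line begins.
--
--     """
--     parts = string.split('\n')
--     line_start_indexes = [0]
--     offset = 0
--     for part in parts[:-1]:
--         offset += len(part) + 1
--         line_start_indexes.append(offset)
--     return line_start_indexes
-- ===== Notes on version B (the rewrite author's own statement) =====
-- stated objective: alternative
-- what changed: Instead of repeatedly calling str.find('\n', index) in a while-loop with manual index bookkeeping, B splits the string on '\n' once and reconstructs the line-start indices as a running prefix sum of segment lengths plus one.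
import Mathlib
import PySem

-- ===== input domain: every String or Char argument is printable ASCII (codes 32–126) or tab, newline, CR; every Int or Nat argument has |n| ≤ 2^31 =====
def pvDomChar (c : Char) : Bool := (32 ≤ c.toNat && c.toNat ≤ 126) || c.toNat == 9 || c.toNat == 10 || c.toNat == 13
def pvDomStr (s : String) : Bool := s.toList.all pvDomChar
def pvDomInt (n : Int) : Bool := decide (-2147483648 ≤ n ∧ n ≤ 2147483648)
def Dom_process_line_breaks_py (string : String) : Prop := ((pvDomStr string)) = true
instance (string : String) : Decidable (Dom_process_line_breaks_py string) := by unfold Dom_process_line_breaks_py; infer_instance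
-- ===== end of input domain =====

-- B replaces A's while-loop over str.find('\n', index) by a single split('\n') followed by a
-- prefix sum of segment lengths; same O(n) cost, different decomposition (objective: alternative).

-- ===== PORT A =====
-- A's `while True` loop: each iteration either breaks (find returned -1) or moves `index`
-- strictly forward past a newline, so it runs at most (#newlines + 1) ≤ length + 1 times;
-- the fuel `length + 1` only makes this same computation total.
def pvLoopA (s : String) : Nat → Int → List Int → List Int
  | 0, _, acc => acc
  | fuel + 1, index, acc =>
    let i := PySem.Str.findFrom s "\n" index
    if i < 0 then acc
    else pvLoopA s fuel (i + 1) (acc ++ [i + 1])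

def process_line_breaks_py (string : String) : List Int :=
  pvLoopA string (string.toList.length + 1) 0 [0]

-- ===== PORT B =====
def pvStepB (st : List Int × Int) (part : String) : List Int × Int :=
  let off := st.2 + PySem.Str.len part + 1
  (st.1 ++ [off], off)

def process_line_breaks_py_alt (string : String) : List Int :=
  match PySem.Str.split? string "\n" with
  | none => []   -- unreachable: the separator "\n" is nonempty
  | some parts =>
    ((PySem.List.slice parts none (some (-1))).foldl pvStepB ([0], 0)).1

-- ===== PRECONDITION & SPEC =====
def Spec_process_line_breaks_py (string : String) (out : List Int) : Prop := out = process_line_breaks_py_alt string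
instance (string : String) (out : List Int) : Decidable (Spec_process_line_breaks_py string out) := by unfold Spec_process_line_breaks_py; infer_instance

-- ===== CLAIM (what is proved, stated in full; the proofs are below) =====
def Claim_equal_process_line_breaks_py : Prop := ∀ (string : String), Dom_process_line_breaks_py string → Spec_process_line_breaks_py string (process_line_breaks_py string)

-- ===== LEMMAS AND PROOFS =====

-- canonical value: the line-start indices (offset k) contributed by the characters of cs
def pvStarts : List Char → Int → List Int
  | [], _ => []
  | c :: cs, k => if c = '\n' then (k + 1) :: pvStarts cs (k + 1) else pvStarts cs (k + 1)

lemma pvStarts_no_nl (cs : List Char) (k : Int) (h : '\n' ∉ cs) : pvStarts cs k = [] := by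
  induction cs generalizing k with
  | nil => rfl
  | cons c cs ih =>
    simp only [List.mem_cons, not_or] at h
    have hc : c ≠ '\n' := fun e => h.1 e.symm
    simp [pvStarts, hc, ih _ h.2]

lemma pvStarts_append (pre rest : List Char) (k : Int) (h : '\n' ∉ pre) :
    pvStarts (pre ++ '\n' :: rest) k
      = (k + pre.length + 1) :: pvStarts rest (k + pre.length + 1) := by
  induction pre generalizing k with
  | nil => simp [pvStarts]
  | cons c pre ih =>
    simp only [List.mem_cons, not_or] at h
    have hc : c ≠ '\n' := fun e => h.1 e.symm
    have harith : k + 1 + (pre.length : Int) + 1 = k + ((c :: pre).length : Int) + 1 := by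
      simp only [List.length_cons]; push_cast; ring
    rw [List.cons_append]
    show (if c = '\n' then _ else pvStarts (pre ++ '\n' :: rest) (k + 1)) = _
    rw [if_neg hc, ih (k + 1) h.2, harith]

-- every string either has no newline or splits at its FIRST newline
lemma pvDecomp (cs : List Char) :
    '\n' ∉ cs ∨ ∃ pre rest, cs = pre ++ '\n' :: rest ∧ '\n' ∉ pre := by
  induction cs with
  | nil => left; simp
  | cons c cs ih =>
    by_cases hc : c = '\n'
    · right; exact ⟨[], cs, by simp [hc], by simp⟩
    · rcases ih with h | ⟨pre, rest, rfl, hpre⟩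
      · left; simp only [List.mem_cons, not_or]; exact ⟨fun e => hc e.symm, h⟩
      · right; exact ⟨c :: pre, rest, rfl, by
          simp only [List.mem_cons, not_or]; exact ⟨fun e => hc e.symm, hpre⟩⟩

-- ---- characterization of Chars.find with sub = ['\n'] ----
lemma pvFindGo_no_nl (l : List Char) (k : Nat) (h : '\n' ∉ l) :
    PySem.Chars.find.go ['\n'] l k = -1 := by
  induction l generalizing k with
  | nil => simp [PySem.Chars.find.go]
  | cons c l ih =>
    simp only [List.mem_cons, not_or] at h
    simp [PySem.Chars.find.go, List.isPrefixOf, h.1, ih _ h.2]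

lemma pvFindGo_app (pre rest : List Char) (k : Nat) (h : '\n' ∉ pre) :
    PySem.Chars.find.go ['\n'] (pre ++ '\n' :: rest) k = (k : Int) + pre.length := by
  induction pre generalizing k with
  | nil => simp [PySem.Chars.find.go, List.isPrefixOf]
  | cons c pre ih =>
    simp only [List.mem_cons, not_or] at h
    simp only [List.cons_append, PySem.Chars.find.go, List.isPrefixOf]
    rw [if_neg (by simp [h.1]), ih _ h.2]
    simp only [List.length_cons]; push_cast; ring

-- ---- characterization of Chars.splitOn with sep = ['\n'] ----
lemma pvSplitGo_acc (fuel : Nat) (l cur : List Char) (acc : List (List Char)) :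
    PySem.Chars.splitOn.go ['\n'] fuel l cur acc
      = acc.reverse ++ PySem.Chars.splitOn.go ['\n'] fuel l cur [] := by
  induction fuel generalizing l cur acc with
  | zero => simp [PySem.Chars.splitOn.go]
  | succ fuel ih =>
    cases l with
    | nil => simp [PySem.Chars.splitOn.go]
    | cons c rest =>
      by_cases hc : c = '\n'
      · simp only [PySem.Chars.splitOn.go, List.isPrefixOf, hc]
        rw [if_pos (by simp), if_pos (by simp)]
        rw [ih _ _ (cur.reverse :: acc), ih _ _ [cur.reverse]]
        simp
      · simp only [PySem.Chars.splitOn.go, List.isPrefixOf]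
        rw [if_neg (by simp; exact fun e => hc e.symm), if_neg (by simp; exact fun e => hc e.symm)]
        exact ih _ _ _

lemma pvSplitGo_no_nl (fuel : Nat) (l cur : List Char) (h : '\n' ∉ l)
    (hf : l.length ≤ fuel) :
    PySem.Chars.splitOn.go ['\n'] fuel l cur [] = [cur.reverse ++ l] := by
  induction fuel generalizing l cur with
  | zero => simp [PySem.Chars.splitOn.go]
  | succ fuel ih =>
    cases l with
    | nil => simp [PySem.Chars.splitOn.go]
    | cons c rest =>
      simp only [List.mem_cons, not_or] at h
      simp only [PySem.Chars.splitOn.go, List.isPrefixOf]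
      rw [if_neg (by simp; exact h.1)]
      rw [ih rest (c :: cur) h.2 (by simpa using Nat.le_of_succ_le_succ hf)]
      simp

lemma pvSplitGo_app (pre rest cur : List Char) (fuel : Nat) (h : '\n' ∉ pre) :
    PySem.Chars.splitOn.go ['\n'] (fuel + (pre.length + 1)) (pre ++ '\n' :: rest) cur []
      = (cur.reverse ++ pre) :: PySem.Chars.splitOn.go ['\n'] fuel rest [] [] := by
  induction pre generalizing cur with
  | nil =>
    simp only [List.nil_append, List.length_nil, Nat.zero_add]
    simp only [PySem.Chars.splitOn.go, List.isPrefixOf]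
    rw [if_pos (by simp)]
    rw [pvSplitGo_acc]
    simp
  | cons c pre ih =>
    simp only [List.mem_cons, not_or] at h
    have harith : fuel + ((c :: pre).length + 1) = (fuel + (pre.length + 1)) + 1 := by
      simp; omega
    rw [harith]
    simp only [List.cons_append, PySem.Chars.splitOn.go, List.isPrefixOf]
    rw [if_neg (by simp; exact h.1)]
    rw [ih (c :: cur) h.2]
    simp

lemma pvSplitOn_no_nl (cs : List Char) (h : '\n' ∉ cs) :
    PySem.Chars.splitOn cs ['\n'] = [cs] := by
  have := pvSplitGo_no_nl (cs.length + 1) cs [] h (by omega)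
  simpa [PySem.Chars.splitOn] using this

lemma pvSplitOn_cons (pre rest : List Char) (h : '\n' ∉ pre) :
    PySem.Chars.splitOn (pre ++ '\n' :: rest) ['\n']
      = pre :: PySem.Chars.splitOn rest ['\n'] := by
  unfold PySem.Chars.splitOn
  have harith : (pre ++ '\n' :: rest).length + 1 = (rest.length + 1) + (pre.length + 1) := by
    simp; omega
  rw [harith, pvSplitGo_app pre rest [] (rest.length + 1) h]
  simp

lemma pvSplitOn_ne_nil (cs : List Char) : PySem.Chars.splitOn cs ['\n'] ≠ [] := by
  rcases pvDecomp cs with h | ⟨pre, rest, rfl, hpre⟩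
  · simp [pvSplitOn_no_nl cs h]
  · simp [pvSplitOn_cons pre rest hpre]

-- ---- A's loop computes pvStarts ----
lemma pvLoopA_eq (s : String) (fuel k : Nat) (acc : List Int)
    (hk : k ≤ s.toList.length)
    (hf : (s.toList.drop k).count '\n' < fuel) :
    pvLoopA s fuel (k : Int) acc = acc ++ pvStarts (s.toList.drop k) k := by
  induction fuel generalizing k acc with
  | zero => omega
  | succ fuel ih =>
    have hfind : PySem.Chars.findFrom s.toList ['\n'] (k : Int)
        = if PySem.Chars.find (s.toList.drop k) ['\n'] = -1 then -1
          else (k : Int) + PySem.Chars.find (s.toList.drop k) ['\n'] :=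
      PySem.Chars.findFrom_natCast s.toList ['\n'] k hk
    rcases pvDecomp (s.toList.drop k) with h | ⟨pre, rest, hsplit, hpre⟩
    · -- no newline at or after k: find returns -1, the loop breaks
      have hneg : PySem.Chars.find (s.toList.drop k) ['\n'] = -1 := by
        unfold PySem.Chars.find; exact pvFindGo_no_nl _ 0 h
      simp [pvLoopA, hfind, hneg, pvStarts_no_nl _ _ h]
    · -- first newline at or after k is at absolute position k + pre.length
      have hfindv : PySem.Chars.find (s.toList.drop k) ['\n'] = (pre.length : Int) := by
        unfold PySem.Chars.find; rw [hsplit]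
        simpa using pvFindGo_app pre rest 0 hpre
      have hlen : s.toList.length - k = pre.length + 1 + rest.length := by
        rw [← List.length_drop, hsplit]; simp; omega
      have hnext : k + pre.length + 1 ≤ s.toList.length := by omega
      have hdrop : s.toList.drop (k + pre.length + 1) = rest := by
        have h1 : s.toList.drop (k + pre.length + 1)
            = (s.toList.drop k).drop (pre.length + 1) := by
          rw [List.drop_drop]; ring_nf
        rw [h1, hsplit, show pre ++ '\n' :: rest = (pre ++ ['\n']) ++ rest by simp,
          show pre.length + 1 = (pre ++ ['\n']).length by simp, List.drop_left]
      have hcount : rest.count '\n' < fuel := by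
        have : (s.toList.drop k).count '\n' = pre.count '\n' + (1 + rest.count '\n') := by
          rw [hsplit]; simp [List.count_append]; omega
        omega
      have hcast : ((k : Int) + (pre.length : Int) + 1) = ((k + pre.length + 1 : Nat) : Int) := by
        push_cast; ring
      have htl : "\n".toList = ['\n'] := rfl
      simp only [pvLoopA, PySem.Str.findFrom_eq, htl, hfind, hfindv]
      rw [if_neg (by omega), if_neg (by omega)]
      rw [hcast, ih (k + pre.length + 1) _ hnext (by rw [hdrop]; exact hcount), hdrop]
      rw [hsplit, pvStarts_append pre rest _ hpre]
      simp only [List.append_assoc, List.singleton_append]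
      congr 2

-- ---- B's fold computes pvStarts ----
lemma pvFoldB_eq (n : Nat) (cs : List Char) (acc : List Int) (off : Int)
    (hn : cs.count '\n' ≤ n) :
    (((PySem.Chars.splitOn cs ['\n']).map String.ofList).dropLast.foldl pvStepB (acc, off)).1
      = acc ++ pvStarts cs off := by
  induction n generalizing cs acc off with
  | zero =>
    have h : '\n' ∉ cs := by
      intro hmem
      have := List.count_pos_iff.mpr hmem
      omega
    rw [pvSplitOn_no_nl cs h]
    simp [pvStarts_no_nl _ _ h]
  | succ n ih =>
    rcases pvDecomp cs with h | ⟨pre, rest, rfl, hpre⟩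
    · rw [pvSplitOn_no_nl cs h]
      simp [pvStarts_no_nl _ _ h]
    · rw [pvSplitOn_cons pre rest hpre]
      have hne : (PySem.Chars.splitOn rest ['\n']).map String.ofList ≠ [] := by
        simp [pvSplitOn_ne_nil rest]
      have hcount : rest.count '\n' ≤ n := by
        have : (pre ++ '\n' :: rest).count '\n'
            = pre.count '\n' + (1 + rest.count '\n') := by
          simp [List.count_append]; omega
        omega
      rw [List.map_cons, List.dropLast_cons_of_ne_nil hne, List.foldl_cons]
      have hstep : pvStepB (acc, off) (String.ofList pre)
          = (acc ++ [off + pre.length + 1], off + pre.length + 1) := by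
        simp [pvStepB, PySem.Str.len]
      rw [hstep, ih rest _ _ hcount, pvStarts_append pre rest off hpre]
      simp

-- ===== VERDICT (by name: the statement is the Claim_ definition above) =====
theorem process_line_breaks_py_spec : Claim_equal_process_line_breaks_py := by
  intro s _
  unfold Spec_process_line_breaks_py process_line_breaks_py process_line_breaks_py_alt
  have hA : pvLoopA s (s.toList.length + 1) ((0 : Nat) : Int) [0]
      = [0] ++ pvStarts (s.toList.drop 0) 0 :=
    pvLoopA_eq s (s.toList.length + 1) 0 [0] (Nat.zero_le _)
      (by simpa using Nat.lt_succ_of_le (List.count_le_length (l := s.toList) (a := '\n')))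
  have hsplit : PySem.Str.split? s "\n"
      = some ((PySem.Chars.splitOn s.toList ['\n']).map String.ofList) := by
    simp [PySem.Str.split?, PySem.Chars.split?]
  rw [hsplit]
  simp only [PySem.List.slice_to_neg_one]
  rw [pvFoldB_eq (s.toList.count '\n') s.toList [0] 0 le_rfl]
  simpa using hA
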